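-- pv_equiv track=rewrite | github.com/renansc/full | app.py | normalize_database_url
-- ===== SOURCE A (Python) =====
-- def normalize_database_url(value: str | None) -> str | None:
--     if not value:
--         return None
--
--     normalized = value.strip()
--     replacements = {
--         "postgres://": "postgresql+psycopg://",
--         "postgresql://": "postgresql+psycopg://",
--         "mysql://": "mysql+pymysql://",
--         "mariadb://": "mysql+pymysql://",
--     }
--
--     for prefix, replacement in replacements.items():
--         if normalized.startswith(prefix):
--             return normalized.replace(prefix, replacement, 1)
--
--     return normalized
-- ===== SOURCE B (Python) =====
-- def normalize_database_url(value):
--     if not value: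
--         return None
--     text = value.strip()
--     scheme, sep, rest = text.partition("://")
--     if not sep:
--         return text
--     mapping = {
--         "postgres": "postgresql+psycopg",
--         "postgresql": "postgresql+psycopg",
--         "mysql": "mysql+pymysql",
--         "mariadb": "mysql+pymysql",
--     }
--     repl = mapping.get(scheme)
--     if repl is None:
--         return text
--     return repl + "://" + rest
-- ===== Notes on version B (the rewrite author's own statement) =====
-- stated objective: idiomatic
-- what changed: B replaces A's ordered prefix-scan loop with replace(...,1) by a single partition on '://' plus a scheme-to-driver dict lookup and string reassembly.
import Mathlib
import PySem

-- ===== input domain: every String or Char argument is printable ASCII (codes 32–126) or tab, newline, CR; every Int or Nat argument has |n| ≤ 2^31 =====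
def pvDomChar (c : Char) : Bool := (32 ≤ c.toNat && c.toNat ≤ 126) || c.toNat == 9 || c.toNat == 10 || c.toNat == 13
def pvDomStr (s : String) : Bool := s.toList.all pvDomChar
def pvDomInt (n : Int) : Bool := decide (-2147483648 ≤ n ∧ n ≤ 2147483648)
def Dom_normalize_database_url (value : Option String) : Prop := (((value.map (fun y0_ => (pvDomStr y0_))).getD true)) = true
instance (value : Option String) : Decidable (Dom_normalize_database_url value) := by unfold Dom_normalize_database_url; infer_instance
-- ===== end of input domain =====

-- B re-implements A's ordered prefix-scan by a single partition on "://" plus a scheme→driver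
-- dict lookup (idiomatic decomposition; same behaviour, same asymptotic cost).

-- ===== PORT A =====
-- s.replace(old, new, 1): replace the first occurrence of old (exact for old ≠ "", which is
-- how A calls it; PySem.Chars.replace has no count argument, so this is ported by hand).
def pvReplace1 (cs old new : List Char) : List Char :=
  let i := PySem.Chars.find cs old
  if i = -1 then cs
  else cs.take i.toNat ++ new ++ cs.drop (i.toNat + old.length)

-- 'for prefix, replacement in replacements.items(): ...' over the literal dict, in order
def pvScanA (t : List Char) : List (List Char × List Char) → List Char
  | [] => t
  | (p, r) :: rest =>
    if PySem.Chars.startswith t p then pvReplace1 t p r else pvScanA t rest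

def normalize_database_url (value : Option String) : Option String :=
  match value with
  | none => none
  | some s =>
    if s = "" then none
    else
      let normalized := PySem.Chars.strip s.toList
      some (String.ofList (pvScanA normalized
        [("postgres://".toList, "postgresql+psycopg://".toList),
         ("postgresql://".toList, "postgresql+psycopg://".toList),
         ("mysql://".toList, "mysql+pymysql://".toList),
         ("mariadb://".toList, "mysql+pymysql://".toList)]))

-- ===== PORT B =====
def pvMapping : PySem.Dict (List Char) (List Char) :=
  PySem.Dict.ofList
    [("postgres".toList, "postgresql+psycopg".toList),
     ("postgresql".toList, "postgresql+psycopg".toList),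
     ("mysql".toList, "mysql+pymysql".toList),
     ("mariadb".toList, "mysql+pymysql".toList)]

-- text.partition("://") = (take i, "://", drop (i+3)) when i = text.find("://") ≥ 0
def normalize_database_url_alt (value : Option String) : Option String :=
  match value with
  | none => none
  | some s =>
    if s = "" then none
    else
      let text := PySem.Chars.strip s.toList
      let i := PySem.Chars.find text "://".toList
      if i = -1 then some (String.ofList text)
      else
        match PySem.Dict.get? pvMapping (text.take i.toNat) with
        | none => some (String.ofList text)
        | some repl => some (String.ofList (repl ++ "://".toList ++ text.drop (i.toNat + 3)))

-- ===== PRECONDITION & SPEC =====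
def Spec_normalize_database_url (value : Option String) (out : Option String) : Prop := out = normalize_database_url_alt value
instance (value : Option String) (out : Option String) : Decidable (Spec_normalize_database_url value out) := by unfold Spec_normalize_database_url; infer_instance

-- ===== CLAIM (what is proved, stated in full; the proofs are below) =====
def Claim_equal_normalize_database_url : Prop := ∀ (value : Option String), Dom_normalize_database_url value → Spec_normalize_database_url value (normalize_database_url value)

-- ===== LEMMAS AND PROOFS =====

-- find points at the first occurrence: if sub occurs at n and nowhere earlier, find = n
lemma pv_find_eq (t sub : List Char) (n : Nat)
    (h1 : sub <+: t.drop n) (h2 : ∀ i < n, ¬ sub <+: t.drop i) :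
    PySem.Chars.find t sub = (n : Int) := by
  have hin : PySem.Chars.isIn sub t = true :=
    (PySem.Chars.exists_prefix_drop_iff_isIn sub t).1 ⟨n, h1⟩
  have hnn : 0 ≤ PySem.Chars.find t sub :=
    (PySem.Chars.find_nonneg_iff t sub).2 ((PySem.Chars.isIn_iff_infix sub t).1 hin)
  obtain ⟨hp, hmin⟩ := PySem.Chars.find_spec hnn
  rcases Nat.lt_trichotomy (PySem.Chars.find t sub).toNat n with h | h | h
  · exact absurd hp (h2 _ h)
  · omega
  · exact absurd h1 (hmin n h)

-- glue: if t's prefix of length pos is k and sub starts at pos, then k ++ sub is a prefix of t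
lemma pv_prefix_concat (t k sub : List Char) (pos : Nat)
    (htake : t.take pos = k) (hpre : sub <+: t.drop pos) : (k ++ sub) <+: t := by
  obtain ⟨r, hr⟩ := hpre
  exact ⟨r, by rw [List.append_assoc, hr, ← htake, List.take_append_drop]⟩

-- if sub starts with ':' and no ':' occurs in k, sub occurs nowhere inside k ++ u before k.length
lemma pv_no_early (k u sub : List Char) (hk : ':' ∉ k) (hsub : ∃ v, sub = ':' :: v)
    (i : Nat) (hi : i < k.length) : ¬ sub <+: (k ++ u).drop i := by
  obtain ⟨v, rfl⟩ := hsub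
  rintro ⟨w, hw⟩
  have h0 : (k ++ u).drop i = ':' :: (v ++ w) := by simpa using hw.symm
  have hlen : i < (k ++ u).length := by simp; omega
  have hget : (k ++ u)[i]'hlen = ':' := by
    have h1 : ((k ++ u).drop i).head? = some ':' := by rw [h0]; rfl
    rw [List.head?_drop] at h1
    simpa [List.getElem?_eq_getElem hlen] using h1
  have h2 : k[i]'hi = ':' := by
    rw [List.getElem_append_left] at hget
    exact hget
  exact hk (h2 ▸ k.getElem_mem hi)

-- replace(p, n, 1) when p is a (nonempty-or-empty) prefix of t: n ++ rest
lemma pv_replace1_prefix (t p n : List Char) (hp : p <+: t) :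
    pvReplace1 t p n = n ++ t.drop p.length := by
  have hf : PySem.Chars.find t p = (0 : Int) := by
    have := pv_find_eq t p 0 (by simpa using hp) (by omega)
    simpa using this
  simp [pvReplace1, hf]

-- B's core on a hit: t starts with scheme k (no ':'), mapped to repl
lemma pv_rhs_hit (t k repl : List Char) (hk : ':' ∉ k)
    (hpre : (k ++ "://".toList) <+: t)
    (hget : PySem.Dict.get? pvMapping k = some repl) :
    (if PySem.Chars.find t "://".toList = -1 then t
     else
       match PySem.Dict.get? pvMapping (t.take (PySem.Chars.find t "://".toList).toNat) with
       | none => t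
       | some repl => repl ++ "://".toList ++ t.drop ((PySem.Chars.find t "://".toList).toNat + 3))
    = repl ++ "://".toList ++ t.drop (k.length + 3) := by
  obtain ⟨r, hr⟩ := hpre
  have ht : t = k ++ ("://".toList ++ r) := by rw [← hr, List.append_assoc]
  have hf : PySem.Chars.find t "://".toList = (k.length : Int) := by
    apply pv_find_eq
    · rw [ht, List.drop_left]; exact ⟨r, rfl⟩
    · intro i hi
      rw [ht]
      exact pv_no_early k _ _ hk ⟨['/', '/'], rfl⟩ i hi
  have hne : PySem.Chars.find t "://".toList ≠ -1 := by rw [hf]; omega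
  rw [if_neg hne, hf]
  have htake : t.take ((k.length : Int)).toNat = k := by
    rw [ht]; simp
  rw [htake, hget]
  simp

-- the core equivalence on the stripped character list
lemma pv_core0 (t : List Char) :
    pvScanA t
      [("postgres://".toList, "postgresql+psycopg://".toList),
       ("postgresql://".toList, "postgresql+psycopg://".toList),
       ("mysql://".toList, "mysql+pymysql://".toList),
       ("mariadb://".toList, "mysql+pymysql://".toList)] =
    (if PySem.Chars.find t "://".toList = -1 then t
     else
       match PySem.Dict.get? pvMapping (t.take (PySem.Chars.find t "://".toList).toNat) with
       | none => t
       | some repl => repl ++ "://".toList ++ t.drop ((PySem.Chars.find t "://".toList).toNat + 3)) := by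
  by_cases h1 : PySem.Chars.startswith t "postgres://".toList
  · have hp0 : "postgres://".toList <+: t := (PySem.Chars.startswith_iff t _).1 h1
    have hp : ("postgres".toList ++ "://".toList) <+: t := hp0
    rw [pv_rhs_hit t "postgres".toList "postgresql+psycopg".toList (by decide) hp (by rfl)]
    simp only [pvScanA, if_pos h1]
    rw [pv_replace1_prefix t _ _ hp0]
    rfl
  by_cases h2 : PySem.Chars.startswith t "postgresql://".toList
  · have hp0 : "postgresql://".toList <+: t := (PySem.Chars.startswith_iff t _).1 h2
    have hp : ("postgresql".toList ++ "://".toList) <+: t := hp0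
    rw [pv_rhs_hit t "postgresql".toList "postgresql+psycopg".toList (by decide) hp (by rfl)]
    simp only [pvScanA, if_neg h1, if_pos h2]
    rw [pv_replace1_prefix t _ _ hp0]
    rfl
  by_cases h3 : PySem.Chars.startswith t "mysql://".toList
  · have hp0 : "mysql://".toList <+: t := (PySem.Chars.startswith_iff t _).1 h3
    have hp : ("mysql".toList ++ "://".toList) <+: t := hp0
    rw [pv_rhs_hit t "mysql".toList "mysql+pymysql".toList (by decide) hp (by rfl)]
    simp only [pvScanA, if_neg h1, if_neg h2, if_pos h3]
    rw [pv_replace1_prefix t _ _ hp0]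
    rfl
  by_cases h4 : PySem.Chars.startswith t "mariadb://".toList
  · have hp0 : "mariadb://".toList <+: t := (PySem.Chars.startswith_iff t _).1 h4
    have hp : ("mariadb".toList ++ "://".toList) <+: t := hp0
    rw [pv_rhs_hit t "mariadb".toList "mysql+pymysql".toList (by decide) hp (by rfl)]
    simp only [pvScanA, if_neg h1, if_neg h2, if_neg h3, if_pos h4]
    rw [pv_replace1_prefix t _ _ hp0]
    rfl
  -- no prefix matches: both sides return t
  · simp only [pvScanA, if_neg h1, if_neg h2, if_neg h3, if_neg h4]
    by_cases hf : PySem.Chars.find t "://".toList = -1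
    · rw [if_pos hf]
    · rw [if_neg hf]
      have hnn : 0 ≤ PySem.Chars.find t "://".toList := by
        rcases (PySem.Chars.neg_one_le_find t "://".toList).lt_or_eq with h | h
        · omega
        · exact absurd h.symm hf
      obtain ⟨hpd, _⟩ := PySem.Chars.find_spec hnn
      have hne : ∀ k : List Char,
          PySem.Chars.startswith t (k ++ "://".toList) = false →
          t.take (PySem.Chars.find t "://".toList).toNat ≠ k := by
        intro k hkf hkeq
        have : (k ++ "://".toList) <+: t := pv_prefix_concat t k _ _ hkeq hpd
        rw [(PySem.Chars.startswith_iff t _).2 this] at hkf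
        exact Bool.true_eq_false.mp hkf
      have e1 := hne "postgres".toList (by simp only [Bool.not_eq_true] at h1; exact h1)
      have e2 := hne "postgresql".toList (by simp only [Bool.not_eq_true] at h2; exact h2)
      have e3 := hne "mysql".toList (by simp only [Bool.not_eq_true] at h3; exact h3)
      have e4 := hne "mariadb".toList (by simp only [Bool.not_eq_true] at h4; exact h4)
      have hmk : pvMapping = PySem.Dict.mk
        [("postgres".toList, "postgresql+psycopg".toList),
         ("postgresql".toList, "postgresql+psycopg".toList),
         ("mysql".toList, "mysql+pymysql".toList),
         ("mariadb".toList, "mysql+pymysql".toList)] := by rfl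
      have hg : PySem.Dict.get? pvMapping
          (t.take (PySem.Chars.find t "://".toList).toNat) = none := by
        rw [hmk]
        rw [PySem.Dict.get?_mk_cons, if_neg (by simpa using Ne.symm e1)]
        rw [PySem.Dict.get?_mk_cons, if_neg (by simpa using Ne.symm e2)]
        rw [PySem.Dict.get?_mk_cons, if_neg (by simpa using Ne.symm e3)]
        rw [PySem.Dict.get?_mk_cons, if_neg (by simpa using Ne.symm e4)]
        rfl
      rw [hg]

-- wrapped form matching the ports' bodies
lemma pv_core (t : List Char) :
    some (String.ofList (pvScanA t
      [("postgres://".toList, "postgresql+psycopg://".toList),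
       ("postgresql://".toList, "postgresql+psycopg://".toList),
       ("mysql://".toList, "mysql+pymysql://".toList),
       ("mariadb://".toList, "mysql+pymysql://".toList)])) =
    (if PySem.Chars.find t "://".toList = -1 then some (String.ofList t)
     else
       match PySem.Dict.get? pvMapping (t.take (PySem.Chars.find t "://".toList).toNat) with
       | none => some (String.ofList t)
       | some repl => some (String.ofList (repl ++ "://".toList ++ t.drop ((PySem.Chars.find t "://".toList).toNat + 3)))) := by
  rw [pv_core0]
  by_cases hf : PySem.Chars.find t "://".toList = -1
  · rw [if_pos hf, if_pos hf]
  · rw [if_neg hf, if_neg hf]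
    cases PySem.Dict.get? pvMapping (t.take (PySem.Chars.find t "://".toList).toNat) <;> rfl

-- ===== VERDICT (by name: the statement is the Claim_ definition above) =====
theorem normalize_database_url_spec : Claim_equal_normalize_database_url := by
  intro value _
  unfold Spec_normalize_database_url normalize_database_url normalize_database_url_alt
  match value with
  | none => rfl
  | some s =>
    by_cases h : s = ""
    · simp [h]
    · simp only [if_neg h]
      exact pv_core (PySem.Chars.strip s.toList)
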